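-- pv_equiv track=rewrite | github.com/baljeetsinghipu/Machine-Learning-Project | Naive_Bayes/Naive_Bayes.py | common_words_counter
-- ===== SOURCE A (Python) =====
-- def common_words_counter(spam_counter, ham_counter):
--     temp_list=[]
--     for key,value in spam_counter.items():
--         temp_list.append(key)
--     for key,value in ham_counter.items():
--         if key not in temp_list:
--             temp_list.append(key)
--     return len(temp_list)
-- ===== SOURCE B (Python) =====
-- def common_words_counter(spam_counter, ham_counter):
--     overlap = sum(1 for key in ham_counter if key in spam_counter)
--     return len(spam_counter) + len(ham_counter) - overlap
-- ===== Notes on version B (the rewrite author's own statement) =====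
-- stated objective: faster
-- what changed: B never builds A's union list: it counts the keys shared by both dicts via dict membership and returns len(spam)+len(ham)-overlap by inclusion-exclusion, eliminating A's O(n) list-membership test inside the loop.
import Mathlib
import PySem

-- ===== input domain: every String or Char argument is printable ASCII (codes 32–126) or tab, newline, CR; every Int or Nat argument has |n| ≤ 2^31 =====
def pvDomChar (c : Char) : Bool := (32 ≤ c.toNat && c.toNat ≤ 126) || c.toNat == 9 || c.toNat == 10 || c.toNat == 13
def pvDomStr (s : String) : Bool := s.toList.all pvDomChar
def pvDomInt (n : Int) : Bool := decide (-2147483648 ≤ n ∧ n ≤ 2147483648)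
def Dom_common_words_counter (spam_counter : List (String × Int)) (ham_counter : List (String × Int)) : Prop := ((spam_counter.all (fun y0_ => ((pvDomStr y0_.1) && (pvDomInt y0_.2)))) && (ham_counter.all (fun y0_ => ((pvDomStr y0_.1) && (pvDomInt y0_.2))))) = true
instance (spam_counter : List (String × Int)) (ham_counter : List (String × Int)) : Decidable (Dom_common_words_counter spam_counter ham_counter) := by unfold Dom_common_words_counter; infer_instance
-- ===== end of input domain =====

-- B avoids building A's union list: it counts the overlap by membership and returns
-- len(spam) + len(ham) - overlap (inclusion-exclusion). Objective: simpler.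

-- ===== PORT A =====
-- A builds temp_list: all spam keys, then each ham key not already in the list; returns its length.
def common_words_counter (spam_counter : List (String × Int)) (ham_counter : List (String × Int)) : Int :=
  let sd := PySem.Dict.ofList spam_counter
  let hd := PySem.Dict.ofList ham_counter
  let temp1 := sd.items.foldl (fun tl kv => tl ++ [kv.1]) []
  let temp2 := hd.items.foldl (fun tl kv => if tl.contains kv.1 then tl else tl ++ [kv.1]) temp1
  (temp2.length : Int)

-- ===== PORT B =====
-- overlap = sum(1 for key in ham_counter if key in spam_counter); len(spam)+len(ham)-overlap
def common_words_counter_alt (spam_counter : List (String × Int)) (ham_counter : List (String × Int)) : Int :=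
  let sd := PySem.Dict.ofList spam_counter
  let hd := PySem.Dict.ofList ham_counter
  let overlap := (hd.keys.filter (fun k => sd.contains k)).length
  (sd.size : Int) + (hd.size : Int) - (overlap : Int)

-- ===== PRECONDITION & SPEC =====
def Spec_common_words_counter (spam_counter : List (String × Int)) (ham_counter : List (String × Int)) (out : Int) : Prop := out = common_words_counter_alt spam_counter ham_counter
instance (spam_counter : List (String × Int)) (ham_counter : List (String × Int)) (out : Int) : Decidable (Spec_common_words_counter spam_counter ham_counter out) := by unfold Spec_common_words_counter; infer_instance

-- ===== CLAIM (what is proved, stated in full; the proofs are below) =====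
def Claim_equal_common_words_counter : Prop := ∀ (spam_counter : List (String × Int)) (ham_counter : List (String × Int)), Dom_common_words_counter spam_counter ham_counter → Spec_common_words_counter spam_counter ham_counter (common_words_counter spam_counter ham_counter)

-- ===== LEMMAS AND PROOFS =====

-- The unconditional first loop just concatenates the keys.
theorem pv_foldl_append_keys (l : List (String × Int)) (acc : List String) :
    l.foldl (fun tl kv => tl ++ [kv.1]) acc = acc ++ l.map (·.1) := by
  induction l generalizing acc with
  | nil => simp
  | cons kv rest ih => simp [List.foldl_cons, ih]

-- The conditional second loop, over pairs with Nodup keys, adds exactly the keys missing from tl.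
theorem pv_foldl_dedup_len (l : List (String × Int)) (tl : List String)
    (h : (l.map (·.1)).Nodup) :
    (l.foldl (fun tl kv => if tl.contains kv.1 then tl else tl ++ [kv.1]) tl).length
      = tl.length + ((l.map (·.1)).filter (fun k => !tl.contains k)).length := by
  induction l generalizing tl with
  | nil => simp
  | cons kv rest ih =>
    simp only [List.map_cons, List.nodup_cons] at h
    obtain ⟨hk, hrest⟩ := h
    rw [List.foldl_cons, List.map_cons, List.filter_cons]
    by_cases hc : tl.contains kv.1
    · have hm : kv.1 ∈ tl := by simpa using hc
      rw [if_pos hc, ih _ hrest]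
      simp [hm]
    · rw [if_neg hc, ih _ hrest]
      have hcong : (rest.map (·.1)).filter (fun k => !(tl ++ [kv.1]).contains k)
          = (rest.map (·.1)).filter (fun k => !tl.contains k) := by
        apply List.filter_congr
        intro x hx
        have hne : x ≠ kv.1 := fun he => hk (he ▸ hx)
        simp [hne]
      rw [hcong]
      have hm : kv.1 ∉ tl := by simpa using hc
      simp [hm, List.length_append]
      omega

theorem pv_filter_split (H : List String) (p : String → Bool) :
    (H.filter p).length + (H.filter (fun k => !p k)).length = H.length := by
  induction H with
  | nil => simp
  | cons x rest ih =>
    by_cases hx : p x <;> simp [hx] <;> omega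

-- ===== VERDICT (by name: the statement is the Claim_ definition above) =====
theorem common_words_counter_spec : Claim_equal_common_words_counter := by
  intro spam ham _
  unfold Spec_common_words_counter common_words_counter common_words_counter_alt
  dsimp only
  set sd := PySem.Dict.ofList spam with hsd
  set hd := PySem.Dict.ofList ham with hhd
  have hnod : (hd.items.map (fun p : String × Int => p.1)).Nodup := by
    have := PySem.Dict.nodup_keys_ofList (κ := String) (ν := Int) ham
    simpa [PySem.Dict.keys, hhd] using this
  rw [pv_foldl_append_keys, pv_foldl_dedup_len _ _ hnod]
  have hcon : ∀ x : String, (([] ++ sd.items.map (fun p : String × Int => p.1)).contains x) = sd.contains x := by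
    intro x
    rw [PySem.Dict.contains_eq_decide_mem_keys]
    simp [PySem.Dict.keys]
  have hcong : (hd.items.map (fun p : String × Int => p.1)).filter (fun k => !([] ++ sd.items.map (fun p : String × Int => p.1)).contains k)
      = (hd.items.map (fun p : String × Int => p.1)).filter (fun k => !sd.contains k) := by
    apply List.filter_congr
    intro x _
    rw [hcon]
  rw [hcong]
  have hsplit := pv_filter_split (hd.items.map (fun p : String × Int => p.1)) (fun k => sd.contains k)
  have h1 : sd.size = sd.items.length := rfl
  have h2 : hd.size = hd.items.length := rfl
  have h3 : hd.keys = hd.items.map (fun p : String × Int => p.1) := rfl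
  rw [h1, h2, h3]
  simp only [List.nil_append, List.length_map]
  simp only [List.length_map] at hsplit
  omega
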